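-- pv_equiv track=rewrite | github.com/platereader/gathode | platereader/plate.py | guessWellIds
-- ===== SOURCE A (Python) =====
-- def guessWellIds(numberOfWells):
--     """
--     Return well ids by guessing the plate layout based on number of wells.
--
--     This function will return A1-P24 or A1-H12.
--
--     :param numberOfWells: number of wells of the plate
--     :type numberOfWells: int
--
--     :return: list(str) -- the guessed well ids (None if layout could not be guessed)
--     """
--     # some "heuristics" about well ids: A1-P24 or A1-H12
--     if numberOfWells == 384:
--         labeldivisor=24
--     elif numberOfWells == 96:
--         labeldivisor=12
--     else:
--         return None
--     rowlabels=[chr(x) for x in range(ord('A'), ord('P') + 1)]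
--     wellids=[]
--     for i in range(numberOfWells):
--         (lblchar,lblnum)=divmod(i, labeldivisor)
--         wellids.append(str(rowlabels[lblchar])+str(lblnum+1))
--     return wellids
-- ===== SOURCE B (Python) =====
-- def guessWellIds(numberOfWells):
--     if numberOfWells == 384:
--         labeldivisor = 24
--     elif numberOfWells == 96:
--         labeldivisor = 12
--     else:
--         return None
--     numRows = numberOfWells // labeldivisor
--     rowlabels = [chr(ord('A') + r) for r in range(numRows)]
--     wellids = []
--     for row in rowlabels:
--         for c in range(labeldivisor):
--             wellids.append(row + str(c + 1))
--     return wellids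
-- ===== Notes on version B (the rewrite author's own statement) =====
-- stated objective: alternative
-- what changed: B makes the row/column grid explicit (row count derived from the well count, nested loops over rows then columns) instead of recovering the row and column with divmod over a flat range of a fixed row-label table.
import Mathlib
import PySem

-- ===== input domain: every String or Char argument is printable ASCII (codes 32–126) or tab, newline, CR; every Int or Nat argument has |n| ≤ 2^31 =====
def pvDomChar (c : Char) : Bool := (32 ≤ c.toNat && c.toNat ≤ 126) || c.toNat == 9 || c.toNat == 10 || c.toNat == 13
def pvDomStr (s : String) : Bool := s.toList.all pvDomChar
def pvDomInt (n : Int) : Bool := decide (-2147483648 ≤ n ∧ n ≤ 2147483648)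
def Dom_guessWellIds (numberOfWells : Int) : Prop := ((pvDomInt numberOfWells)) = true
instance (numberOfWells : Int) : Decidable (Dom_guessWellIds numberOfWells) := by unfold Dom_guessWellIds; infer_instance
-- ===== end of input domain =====

set_option maxRecDepth 40000


-- B builds the well-id grid with explicit nested row/column loops (row count derived from the well count) instead of divmod over a flat range; alternative decomposition, same output.

-- ===== PORT A =====
-- rowlabels = [chr(x) for x in range(ord('A'), ord('P')+1)]
def pvRowLabelsA : List String :=
  (PySem.List.pyRange 65 81 1).map (fun x => String.mk [Char.ofNat x.toNat])

-- for i in range(numberOfWells): (lblchar, lblnum) = divmod(i, labeldivisor); append rowlabels[lblchar] + str(lblnum+1)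
-- rowlabels[lblchar] is in range on every reachable input; the '.getD ""' stands for the IndexError case, which never occurs.
def guessWellIdsBody (numberOfWells labeldivisor : Int) : List String :=
  (PySem.List.pyRange 0 numberOfWells 1).foldl
    (fun wellids i =>
      let lblchar := PySem.Int.floordiv i labeldivisor
      let lblnum := PySem.Int.mod i labeldivisor
      wellids ++ [((PySem.List.pyGet? pvRowLabelsA lblchar).getD "") ++ PySem.Int.toStr (lblnum + 1)])
    []

def guessWellIds (numberOfWells : Int) : Option (List String) :=
  if numberOfWells = 384 then some (guessWellIdsBody numberOfWells 24)
  else if numberOfWells = 96 then some (guessWellIdsBody numberOfWells 12)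
  else none

-- ===== PORT B =====
-- numRows = numberOfWells // labeldivisor; rowlabels = [chr(ord('A')+r) for r in range(numRows)]
-- nested loops: for row in rowlabels: for c in range(labeldivisor): append row + str(c+1)
def guessWellIdsGrid (numberOfWells labeldivisor : Int) : List String :=
  let numRows := PySem.Int.floordiv numberOfWells labeldivisor
  let rowlabels := (PySem.List.pyRange 0 numRows 1).map
    (fun r => String.mk [Char.ofNat (65 + r).toNat])
  rowlabels.foldl
    (fun wellids row =>
      (PySem.List.pyRange 0 labeldivisor 1).foldl
        (fun acc c => acc ++ [row ++ PySem.Int.toStr (c + 1)]) wellids)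
    []

def guessWellIds_alt (numberOfWells : Int) : Option (List String) :=
  if numberOfWells = 384 then some (guessWellIdsGrid numberOfWells 24)
  else if numberOfWells = 96 then some (guessWellIdsGrid numberOfWells 12)
  else none

-- ===== PRECONDITION & SPEC =====
def Spec_guessWellIds (numberOfWells : Int) (out : Option (List String)) : Prop := out = guessWellIds_alt numberOfWells
instance (numberOfWells : Int) (out : Option (List String)) : Decidable (Spec_guessWellIds numberOfWells out) := by unfold Spec_guessWellIds; infer_instance

-- ===== CLAIM (what is proved, stated in full; the proofs are below) =====
def Claim_equal_guessWellIds : Prop := ∀ (numberOfWells : Int), Dom_guessWellIds numberOfWells → Spec_guessWellIds numberOfWells (guessWellIds numberOfWells)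

-- ===== LEMMAS AND PROOFS =====
theorem guessWellIds_eq_384 : guessWellIds 384 = guessWellIds_alt 384 := by decide

theorem guessWellIds_eq_96 : guessWellIds 96 = guessWellIds_alt 96 := by decide

-- ===== VERDICT (by name: the statement is the Claim_ definition above) =====
theorem guessWellIds_spec : Claim_equal_guessWellIds := by
  intro n _
  unfold Spec_guessWellIds
  by_cases h1 : n = 384
  · subst h1; exact guessWellIds_eq_384
  · by_cases h2 : n = 96
    · subst h2; exact guessWellIds_eq_96
    · simp [guessWellIds, guessWellIds_alt, h1, h2]
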